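-- pv_equiv track=rewrite | github.com/erraf132/BlackHaven | skills/omega_core.py | expand_usernames
-- ===== SOURCE A (Python) =====
-- from typing import Dict, Iterable, List, Set, Tuple
--
-- def expand_usernames(username: str) -> List[str]:
--     variations: List[str] = []
--     for i in range(1000):
--         variations.append(f"{username}{i}")
--         variations.append(f"{username}_{i}")
--         variations.append(f"{username}.{i}")
--         if len(variations) >= 100:
--             break
--     return variations[:100]
-- ===== SOURCE B (Python) =====
-- def expand_usernames(username):
--     out = []
--     for n in range(100):
--         i, r = divmod(n, 3)
--         if r == 0:
--             out.append(f"{username}{i}")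
--         elif r == 1:
--             out.append(f"{username}_{i}")
--         else:
--             out.append(f"{username}.{i}")
--     return out
-- ===== Notes on version B (the rewrite author's own statement) =====
-- stated objective: simpler
-- what changed: Replaced the range(1000) loop with three appends per iteration, a running-length break and a final [:100] slice by a single flat loop over range(100) that computes the number and separator of each element directly with divmod.
import Mathlib
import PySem

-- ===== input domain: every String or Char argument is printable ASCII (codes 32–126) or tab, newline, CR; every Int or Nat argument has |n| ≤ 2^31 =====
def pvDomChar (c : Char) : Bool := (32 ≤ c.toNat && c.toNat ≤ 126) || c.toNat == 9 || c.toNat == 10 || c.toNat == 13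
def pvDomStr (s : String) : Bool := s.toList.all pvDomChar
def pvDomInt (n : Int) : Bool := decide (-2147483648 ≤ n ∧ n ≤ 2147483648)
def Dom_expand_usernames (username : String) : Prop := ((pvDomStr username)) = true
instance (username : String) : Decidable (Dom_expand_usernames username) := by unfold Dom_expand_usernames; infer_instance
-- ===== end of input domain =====

-- B builds the 100 variations with one flat loop over range(100), deriving each element's number and separator by divmod; A loops to 1000 appending three per step with a break and a final slice. Same return value; objective: simpler.

-- ===== PORT A =====
-- A's loop body: three appends per i, then 'if len(variations) >= 100: break'
def expand_usernames_loop (username : String) : List Int → List String → List String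
  | [], variations => variations
  | i :: rest, variations =>
    let variations := variations ++ [username ++ PySem.Int.toStr i]
    let variations := variations ++ [username ++ "_" ++ PySem.Int.toStr i]
    let variations := variations ++ [username ++ "." ++ PySem.Int.toStr i]
    if variations.length ≥ 100 then variations
    else expand_usernames_loop username rest variations

def expand_usernames (username : String) : List String :=
  PySem.List.slice (expand_usernames_loop username (PySem.List.pyRange 0 1000 1) []) none (some 100)

-- ===== PORT B =====
-- Source B: for n in range(100): i, r = divmod(n, 3); append the one string for this n
def expand_usernames_alt (username : String) : List String :=
  (PySem.List.pyRange 0 100 1).map (fun n =>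
    let i := PySem.Int.floordiv n 3
    let r := PySem.Int.mod n 3
    if r = 0 then username ++ PySem.Int.toStr i
    else if r = 1 then username ++ "_" ++ PySem.Int.toStr i
    else username ++ "." ++ PySem.Int.toStr i)

-- ===== PRECONDITION & SPEC =====
def Spec_expand_usernames (username : String) (out : List String) : Prop := out = expand_usernames_alt username
instance (username : String) (out : List String) : Decidable (Spec_expand_usernames username out) := by unfold Spec_expand_usernames; infer_instance

-- ===== CLAIM (what is proved, stated in full; the proofs are below) =====
def Claim_equal_expand_usernames : Prop := ∀ (username : String), Dom_expand_usernames username → Spec_expand_usernames username (expand_usernames username)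

-- ===== LEMMAS AND PROOFS =====

-- the common value of both ports: the 100 variations, written out
def expandList (u : String) : List String := [u ++ PySem.Int.toStr 0, u ++ "_" ++ PySem.Int.toStr 0, u ++ "." ++ PySem.Int.toStr 0, u ++ PySem.Int.toStr 1, u ++ "_" ++ PySem.Int.toStr 1, u ++ "." ++ PySem.Int.toStr 1, u ++ PySem.Int.toStr 2, u ++ "_" ++ PySem.Int.toStr 2, u ++ "." ++ PySem.Int.toStr 2, u ++ PySem.Int.toStr 3, u ++ "_" ++ PySem.Int.toStr 3, u ++ "." ++ PySem.Int.toStr 3, u ++ PySem.Int.toStr 4, u ++ "_" ++ PySem.Int.toStr 4, u ++ "." ++ PySem.Int.toStr 4, u ++ PySem.Int.toStr 5, u ++ "_" ++ PySem.Int.toStr 5, u ++ "." ++ PySem.Int.toStr 5, u ++ PySem.Int.toStr 6, u ++ "_" ++ PySem.Int.toStr 6, u ++ "." ++ PySem.Int.toStr 6, u ++ PySem.Int.toStr 7, u ++ "_" ++ PySem.Int.toStr 7, u ++ "." ++ PySem.Int.toStr 7, u ++ PySem.Int.toStr 8, u ++ "_" ++ PySem.Int.toStr 8, u ++ "." ++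 PySem.Int.toStr 8, u ++ PySem.Int.toStr 9, u ++ "_" ++ PySem.Int.toStr 9, u ++ "." ++ PySem.Int.toStr 9, u ++ PySem.Int.toStr 10, u ++ "_" ++ PySem.Int.toStr 10, u ++ "." ++ PySem.Int.toStr 10, u ++ PySem.Int.toStr 11, u ++ "_" ++ PySem.Int.toStr 11, u ++ "." ++ PySem.Int.toStr 11, u ++ PySem.Int.toStr 12, u ++ "_" ++ PySem.Int.toStr 12, u ++ "." ++ PySem.Int.toStr 12, u ++ PySem.Int.toStr 13, u ++ "_" ++ PySem.Int.toStr 13, u ++ "." ++ PySem.Int.toStr 13, u ++ PySem.Int.toStr 14, u ++ "_" ++ PySem.Int.toStr 14, u ++ "." ++ PySem.Int.toStr 14, u ++ PySem.Int.toStr 15, u ++ "_" ++ PySem.Int.toStr 15, u ++ "." ++ PySem.Int.toStr 15, u ++ PySem.Int.toStr 16, u ++ "_" ++ PySem.Int.toStr 16, u ++ "." ++ PySem.Int.toStr 16, u ++ PySem.Int.toStr 17, u ++ "_" ++ PySem.Int.toStr 17, u ++ "." ++ PySem.Int.toStr 17, u ++ PySem.Int.toStr 18, u ++ "_" ++ PySem.Int.toStr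 18, u ++ "." ++ PySem.Int.toStr 18, u ++ PySem.Int.toStr 19, u ++ "_" ++ PySem.Int.toStr 19, u ++ "." ++ PySem.Int.toStr 19, u ++ PySem.Int.toStr 20, u ++ "_" ++ PySem.Int.toStr 20, u ++ "." ++ PySem.Int.toStr 20, u ++ PySem.Int.toStr 21, u ++ "_" ++ PySem.Int.toStr 21, u ++ "." ++ PySem.Int.toStr 21, u ++ PySem.Int.toStr 22, u ++ "_" ++ PySem.Int.toStr 22, u ++ "." ++ PySem.Int.toStr 22, u ++ PySem.Int.toStr 23, u ++ "_" ++ PySem.Int.toStr 23, u ++ "." ++ PySem.Int.toStr 23, u ++ PySem.Int.toStr 24, u ++ "_" ++ PySem.Int.toStr 24, u ++ "." ++ PySem.Int.toStr 24, u ++ PySem.Int.toStr 25, u ++ "_" ++ PySem.Int.toStr 25, u ++ "." ++ PySem.Int.toStr 25, u ++ PySem.Int.toStr 26, u ++ "_" ++ PySem.Int.toStr 26, u ++ "." ++ PySem.Int.toStr 26, u ++ PySem.Int.toStr 27, u ++ "_" ++ PySem.Int.toStr 27, u ++ "." ++ PySem.Int.toStr 27, u ++ PySem.Int.toStr 28,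 u ++ "_" ++ PySem.Int.toStr 28, u ++ "." ++ PySem.Int.toStr 28, u ++ PySem.Int.toStr 29, u ++ "_" ++ PySem.Int.toStr 29, u ++ "." ++ PySem.Int.toStr 29, u ++ PySem.Int.toStr 30, u ++ "_" ++ PySem.Int.toStr 30, u ++ "." ++ PySem.Int.toStr 30, u ++ PySem.Int.toStr 31, u ++ "_" ++ PySem.Int.toStr 31, u ++ "." ++ PySem.Int.toStr 31, u ++ PySem.Int.toStr 32, u ++ "_" ++ PySem.Int.toStr 32, u ++ "." ++ PySem.Int.toStr 32, u ++ PySem.Int.toStr 33]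

set_option maxHeartbeats 1000000 in
theorem expand_usernames_eq_expandList (u : String) : expand_usernames u = expandList u := by
  rw [expand_usernames, PySem.List.pyRange_one_append 0 34 1000 (by norm_num) (by norm_num)]
  rw [show PySem.List.pyRange 0 34 1 = ([0,1,2,3,4,5,6,7,8,9,10,11,12,13,14,15,16,17,18,19,20,21,22,23,24,25,26,27,28,29,30,31,32,33] : List Int) from by decide]
  simp [expand_usernames_loop, expandList, PySem.List.slice]

set_option maxHeartbeats 1000000 in
theorem expand_usernames_alt_eq_expandList (u : String) : expand_usernames_alt u = expandList u := by
  rw [expand_usernames_alt, show PySem.List.pyRange 0 100 1 = ([0,1,2,3,4,5,6,7,8,9,10,11,12,13,14,15,16,17,18,19,20,21,22,23,24,25,26,27,28,29,30,31,32,33,34,35,36,37,38,39,40,41,42,43,44,45,46,47,48,49,50,51,52,53,54,55,56,57,58,59,60,61,62,63,64,65,66,67,68,69,70,71,72,73,74,75,76,77,78,79,80,81,82,83,84,85,86,87,88,89,90,91,92,93,94,95,96,97,98,99] : List Int) from by decide]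
  simp [expandList, PySem.Int.mod, PySem.Int.floordiv]

-- ===== VERDICT (by name: the statement is the Claim_ definition above) =====
theorem expand_usernames_spec : Claim_equal_expand_usernames := by
  intro username _
  unfold Spec_expand_usernames
  rw [expand_usernames_eq_expandList, expand_usernames_alt_eq_expandList]
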